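-- pv_equiv track=rewrite | github.com/satzbeleg/evidence-features | evidence_features/extract_from_conll.py | group_lemma_spans
-- ===== SOURCE A (Python) =====
-- def group_lemma_spans(lemmata, spans):
--     grp = {key: [] for key in set(lemmata)}
--     for key, val in zip(*(lemmata, spans)):
--         grp[key].append(val)
--     lemmata2, spans2 = [], []
--     for key in sorted(grp):
--         lemmata2.append(key)
--         spans2.append(sorted(grp[key], reverse=True))
--     return lemmata2, spans2
-- ===== SOURCE B (Python) =====
-- def group_lemma_spans(lemmata, spans):
--     pairs = sorted(zip(lemmata, spans), key=lambda kv: kv[1], reverse=True)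
--     keys = sorted(set(lemmata))
--     return keys, [[v for k, v in pairs if k == key] for key in keys]
-- ===== Notes on version B (the rewrite author's own statement) =====
-- stated objective: simpler
-- what changed: Instead of seeding a dict from set(lemmata), appending per key and then sorting each group, B does one global stable sort of the zipped pairs by span descending and then collects each key's spans by a per-key scan over sorted(set(lemmata)) - no dict and no per-group sorting.
import Mathlib
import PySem

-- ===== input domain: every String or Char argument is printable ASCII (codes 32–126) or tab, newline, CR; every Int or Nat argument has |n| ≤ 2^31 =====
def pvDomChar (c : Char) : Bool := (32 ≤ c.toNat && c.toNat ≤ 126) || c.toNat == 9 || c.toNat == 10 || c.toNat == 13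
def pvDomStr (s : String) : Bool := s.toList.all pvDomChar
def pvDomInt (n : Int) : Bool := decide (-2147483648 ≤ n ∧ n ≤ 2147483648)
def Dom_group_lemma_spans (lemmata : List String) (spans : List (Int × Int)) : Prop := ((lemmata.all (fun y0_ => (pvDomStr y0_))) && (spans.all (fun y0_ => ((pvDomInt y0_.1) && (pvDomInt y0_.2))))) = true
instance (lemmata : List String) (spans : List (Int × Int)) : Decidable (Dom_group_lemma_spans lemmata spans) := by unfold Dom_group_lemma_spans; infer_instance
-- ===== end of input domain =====

-- B replaces A's dict-grouping + per-group sorts by ONE stable sort of the zipped pairs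
-- (by span, descending) followed by a per-key collection — simpler: no dict at all.

-- ===== PORT A =====
-- 'grp[key].append(val)' never raises (every zip key comes from lemmata), so 'modify'
-- with default [] is exact; likewise 'grp[key]' in the output loop is 'getD key []'
-- exactly, because key ∈ grp.keys there. The dict comprehension iterates set(lemmata)
-- in hash order; only sorted(grp) and lookups are used downstream, so the order of
-- PySem.Set.ofList is equivalent for the result.
def group_lemma_spans (lemmata : List String) (spans : List (Int × Int)) : List String × (List (List (Int × Int))) :=
  let grp0 : PySem.Dict String (List (Int × Int)) :=
    (PySem.Set.ofList lemmata).foldl (fun d key => d.insert key []) PySem.Dict.empty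
  let grp := (lemmata.zip spans).foldl (fun d p => d.modify p.1 [] (· ++ [p.2])) grp0
  (PySem.List.sorted grp.keys (fun k => k) false).foldl
    (fun acc key => (acc.1 ++ [key],
                     acc.2 ++ [PySem.List.sorted2 (grp.getD key []) (fun v => v.1) (fun v => v.2) true]))
    ([], [])

-- ===== PORT B =====
def group_lemma_spans_alt (lemmata : List String) (spans : List (Int × Int)) : List String × (List (List (Int × Int))) :=
  let pairs := PySem.List.sorted2 (lemmata.zip spans) (fun kv => kv.2.1) (fun kv => kv.2.2) true
  let keys := PySem.List.sorted (PySem.Set.ofList lemmata) (fun k => k) false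
  (keys, keys.map (fun key => (pairs.filter (fun kv => kv.1 == key)).map (fun kv => kv.2)))

-- ===== PRECONDITION & SPEC =====
def Spec_group_lemma_spans (lemmata : List String) (spans : List (Int × Int)) (out : List String × (List (List (Int × Int)))) : Prop := out = group_lemma_spans_alt lemmata spans
instance (lemmata : List String) (spans : List (Int × Int)) (out : List String × (List (List (Int × Int)))) : Decidable (Spec_group_lemma_spans lemmata spans out) := by unfold Spec_group_lemma_spans; infer_instance

-- ===== CLAIM (what is proved, stated in full; the proofs are below) =====
def Claim_equal_group_lemma_spans : Prop := ∀ (lemmata : List String) (spans : List (Int × Int)), Dom_group_lemma_spans lemmata spans → Spec_group_lemma_spans lemmata spans (group_lemma_spans lemmata spans)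

-- ===== LEMMAS AND PROOFS =====

-- Python's tuple comparison '(a1,a2) < (b1,b2)', as sorted2's strict key comparison
def pvSLt (a b : Int × Int) : Bool := decide (a.1 < b.1) || (!decide (b.1 < a.1) && decide (a.2 < b.2))

lemma pvSLt_iff (a b : Int × Int) : pvSLt a b = true ↔ (a.1 < b.1 ∨ (a.1 = b.1 ∧ a.2 < b.2)) := by
  simp [pvSLt]; omega

lemma pvSLt_asymm (a b : Int × Int) (h : pvSLt a b = true) : pvSLt b a = false := by
  rw [pvSLt_iff] at h; rw [Bool.eq_false_iff, Ne, pvSLt_iff]; omega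

lemma pvSLt_trans (a b c : Int × Int) (h1 : pvSLt a b = true) (h2 : pvSLt b c = true) : pvSLt a c = true := by
  rw [pvSLt_iff] at *; omega

lemma pvSLt_t2 (a b c : Int × Int) (h1 : pvSLt a b = true) (h2 : pvSLt a c = false) : pvSLt c b = true := by
  rw [pvSLt_iff] at h1 ⊢; rw [Bool.eq_false_iff, Ne, pvSLt_iff] at h2; omega

-- the accumulator invariant of insertion sort: no later element strictly precedes an earlier one
def pvSortedB {α : Type} (before : α → α → Bool) (l : List α) : Prop :=
  l.Pairwise (fun a b => before b a = false)

lemma pv_insertBy_front {α : Type} (before : α → α → Bool) (x : α) (L : List α)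
    (h : ∀ z ∈ L, before x z = true) : PySem.List.insertBy before x L = x :: L := by
  cases L with
  | nil => rfl
  | cons y ys => simp [PySem.List.insertBy, h y (by simp)]

lemma pv_insertBy_sorted {α : Type} (before : α → α → Bool)
    (hAsym : ∀ a b, before a b = true → before b a = false)
    (hTrans : ∀ a b c, before a b = true → before b c = true → before a c = true)
    (x : α) (ys : List α) (hs : pvSortedB before ys) :
    pvSortedB before (PySem.List.insertBy before x ys) := by
  induction ys with
  | nil => simp [PySem.List.insertBy, pvSortedB]
  | cons y ys ih =>
    rcases List.pairwise_cons.mp hs with ⟨hy, hys⟩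
    by_cases hxy : before x y = true
    · simp only [PySem.List.insertBy, hxy, if_pos]
      refine List.pairwise_cons.mpr ⟨?_, hs⟩
      intro z hz
      rcases List.mem_cons.mp hz with rfl | hz'
      · exact hAsym _ _ hxy
      · by_contra hzx
        rw [Bool.not_eq_false] at hzx
        have := hTrans _ _ _ hzx hxy
        rw [hy z hz'] at this; exact Bool.false_ne_true this
    · rw [Bool.not_eq_true] at hxy
      simp only [PySem.List.insertBy, hxy]
      refine List.pairwise_cons.mpr ⟨?_, ih hys⟩
      intro w hw
      rcases (PySem.List.mem_insertBy before x w ys).mp hw with rfl | hw'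
      · exact hxy
      · exact hy w hw'

lemma pv_filter_insertBy {α : Type} (before : α → α → Bool)
    (hT2 : ∀ a b c, before a b = true → before c b = false → before a c = true)
    (p : α → Bool) (x : α) (ys : List α) (hs : pvSortedB before ys) :
    (PySem.List.insertBy before x ys).filter p =
      if p x then PySem.List.insertBy before x (ys.filter p) else ys.filter p := by
  induction ys with
  | nil => cases hpx : p x <;> simp [PySem.List.insertBy, hpx]
  | cons y ys ih =>
    rcases List.pairwise_cons.mp hs with ⟨hy, hys⟩
    by_cases hxy : before x y = true
    · simp only [PySem.List.insertBy, hxy, if_pos]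
      have hfront : ∀ z ∈ (y :: ys).filter p, before x z = true := by
        intro z hz
        rcases List.mem_cons.mp (List.mem_of_mem_filter hz) with rfl | hz'
        · exact hxy
        · exact hT2 _ _ _ hxy (hy z hz')
      cases hpx : p x
      · simp [List.filter, hpx]
      · rw [pv_insertBy_front before x _ hfront]
        simp [List.filter, hpx]
    · rw [Bool.not_eq_true] at hxy
      simp only [PySem.List.insertBy, hxy, Bool.false_eq_true, if_false]
      rw [List.filter_cons, List.filter_cons]
      cases hpy : p y
      · simp only [Bool.false_eq_true, if_false]
        exact ih hys
      · simp only [if_true, ih hys]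
        cases hpx : p x
        · simp
        · simp [PySem.List.insertBy, hxy, Bool.false_eq_true]

lemma pv_filter_foldl_insertBy {α : Type} (before : α → α → Bool)
    (hAsym : ∀ a b, before a b = true → before b a = false)
    (hTrans : ∀ a b c, before a b = true → before b c = true → before a c = true)
    (hT2 : ∀ a b c, before a b = true → before c b = false → before a c = true)
    (p : α → Bool) (xs : List α) (acc : List α) (hs : pvSortedB before acc) :
    (xs.foldl (fun a x => PySem.List.insertBy before x a) acc).filter p =
      (xs.filter p).foldl (fun a x => PySem.List.insertBy before x a) (acc.filter p) := by
  induction xs generalizing acc with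
  | nil => rfl
  | cons x xs ih =>
    simp only [List.foldl_cons]
    rw [ih _ (pv_insertBy_sorted before hAsym hTrans x acc hs),
        pv_filter_insertBy before hT2 p x acc hs]
    cases hpx : p x <;> simp [List.filter, hpx]

lemma pv_map_insertBy {α β : Type} (before' : β → β → Bool) (f : α → β) (x : α) (ys : List α) :
    (PySem.List.insertBy (fun a b => before' (f a) (f b)) x ys).map f =
      PySem.List.insertBy before' (f x) (ys.map f) := by
  induction ys with
  | nil => rfl
  | cons y ys ih =>
    by_cases h : before' (f x) (f y) = true
    · simp [PySem.List.insertBy, h]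
    · rw [Bool.not_eq_true] at h
      simp [PySem.List.insertBy, h, ih]

lemma pv_map_foldl_insertBy {α β : Type} (before' : β → β → Bool) (f : α → β)
    (xs : List α) (acc : List α) :
    (xs.foldl (fun a x => PySem.List.insertBy (fun a b => before' (f a) (f b)) x a) acc).map f =
      (xs.map f).foldl (fun a y => PySem.List.insertBy before' y a) (acc.map f) := by
  induction xs generalizing acc with
  | nil => rfl
  | cons x xs ih => simp only [List.foldl_cons, List.map_cons, ih, pv_map_insertBy]

-- the two sorted2 calls of the ports, written as their insertBy folds (definitional)
lemma pv_sorted2_pairs (xs : List (String × (Int × Int))) :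
    PySem.List.sorted2 xs (fun kv => kv.2.1) (fun kv => kv.2.2) true =
      xs.foldl (fun acc x => PySem.List.insertBy (fun a b => pvSLt b.2 a.2) x acc) [] := rfl

lemma pv_sorted2_spans (xs : List (Int × Int)) :
    PySem.List.sorted2 xs (fun v => v.1) (fun v => v.2) true =
      xs.foldl (fun acc x => PySem.List.insertBy (fun a b => pvSLt b a) x acc) [] := rfl

-- per-key core: filtering the globally sorted pairs = sorting the filtered spans
lemma pv_group (zp : List (String × (Int × Int))) (key : String) :
    ((PySem.List.sorted2 zp (fun kv => kv.2.1) (fun kv => kv.2.2) true).filter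
        (fun kv => kv.1 == key)).map (fun kv => kv.2) =
      PySem.List.sorted2 ((zp.filter (fun kv => kv.1 == key)).map (fun kv => kv.2))
        (fun v => v.1) (fun v => v.2) true := by
  rw [pv_sorted2_pairs, pv_sorted2_spans,
      pv_filter_foldl_insertBy (fun a b => pvSLt b.2 a.2)
        (fun a b h => pvSLt_asymm b.2 a.2 h)
        (fun a b c h1 h2 => pvSLt_trans c.2 b.2 a.2 h2 h1)
        (fun a b c h1 h2 => pvSLt_t2 b.2 a.2 c.2 h1 h2)
        (fun kv => kv.1 == key) zp [] (List.Pairwise.nil)]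
  simp only [List.filter_nil]
  exact pv_map_foldl_insertBy (before' := fun a b => pvSLt b a)
    (f := fun kv : String × (Int × Int) => kv.2) _ []

-- A's seed dict {key: [] for key in set(lemmata)}: every value is []
lemma pv_grp0_getD (l : List String) (d : PySem.Dict String (List (Int × Int)))
    (hd : ∀ c, d.getD c [] = []) (c : String) :
    (l.foldl (fun d key => d.insert key ([] : List (Int × Int))) d).getD c [] = [] := by
  induction l generalizing d with
  | nil => exact hd c
  | cons k l ih =>
    simp only [List.foldl_cons]
    refine ih _ (fun c' => ?_)
    rw [PySem.Dict.getD_insert]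
    split <;> [rfl; exact hd c']

lemma pv_keys_update (lemmata : List String) (spans : List (Int × Int)) :
    PySem.Set.update (PySem.Set.ofList lemmata) ((lemmata.zip spans).map (fun p => p.1)) =
      PySem.Set.ofList lemmata := by
  rw [PySem.Set.update_eq_append_filter]
  have h : ∀ y ∈ PySem.Set.ofList ((lemmata.zip spans).map (fun p => p.1)), y ∈ lemmata := by
    intro y hy
    rcases List.mem_map.mp ((PySem.Set.mem_ofList _ _).mp hy) with ⟨p, hp, rfl⟩
    exact (List.of_mem_zip hp).1
  rw [List.filter_eq_nil_iff.mpr (fun y hy => by simp [pysem, h y hy]), List.append_nil]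

-- ===== VERDICT (by name: the statement is the Claim_ definition above) =====
theorem group_lemma_spans_spec : Claim_equal_group_lemma_spans := by
  intro lemmata spans _
  unfold Spec_group_lemma_spans group_lemma_spans group_lemma_spans_alt
  simp only []
  -- name the dicts of A
  set grp0 : PySem.Dict String (List (Int × Int)) :=
    (PySem.Set.ofList lemmata).foldl (fun d key => d.insert key []) PySem.Dict.empty with hgrp0
  set grp : PySem.Dict String (List (Int × Int)) :=
    (lemmata.zip spans).foldl (fun d p => d.modify p.1 [] (· ++ [p.2])) grp0 with hgrp
  -- A's output loop is (keys, keys.map …)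
  rw [PySem.List.foldl_prod_mk
        (f := fun (a : List String) key => a ++ [key])
        (g := fun (a : List (List (Int × Int))) key =>
          a ++ [PySem.List.sorted2 (grp.getD key []) (fun v => v.1) (fun v => v.2) true])]
  rw [PySem.List.foldl_append_singleton_eq_self, PySem.List.foldl_append_singleton_eq_map]
  simp only [List.nil_append]
  -- the keys of grp are exactly set(lemmata)
  have hkeys : grp.keys = PySem.Set.ofList lemmata := by
    rw [hgrp, PySem.Dict.keys_foldl_modify_key, hgrp0, PySem.Dict.keys_foldl_insert,
        PySem.Dict.keys_empty, PySem.Set.update_nil_left, PySem.Set.ofList_ofList,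
        pv_keys_update]
  rw [hkeys]
  -- per key, A's group equals B's group
  refine Prod.ext rfl ?_
  refine List.map_congr_left (fun key _ => ?_)
  have hget : grp.getD key [] = ((lemmata.zip spans).filter (fun p => p.1 == key)).map (fun p => p.2) := by
    rw [hgrp, PySem.Dict.getD_foldl_modify_append, hgrp0,
        pv_grp0_getD (PySem.Set.ofList lemmata) PySem.Dict.empty
          (fun c => PySem.Dict.getD_empty c []) key,
        List.nil_append]
  rw [hget, ← pv_group]
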